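-- pv_equiv track=rewrite | github.com/miliar/Code_Jam_Webscraper | solutions_python/Problem_180/1023.py | solution
-- ===== SOURCE A (Python) =====
-- def solution(K, C, S):
--     s = []
--     for i in range(K):
--         res = i + 1
--         for j in range(C - 1):
--             res = (res - 1) * K + i + 1;
--         s.append(res)
--     return ' '.join(map(str, s))
-- ===== SOURCE B (Python) =====
-- def solution(K, C, S):
--     # value for index i is i * (1 + K + ... + K^(max(C,1)-1)) + 1:
--     # compute the geometric sum once (fast pow + exact division), then
--     # emit the K values by repeated addition.
--     if K <= 0:
--         return ''
--     n = max(C, 1)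
--     geom = n if K == 1 else (pow(K, n) - 1) // (K - 1)
--     parts = []
--     res = 1
--     for _ in range(K):
--         parts.append(str(res))
--         res += geom
--     return ' '.join(parts)
-- ===== Notes on version B (the rewrite author's own statement) =====
-- stated objective: faster
-- what changed: Replaces the O(K*C) per-element recurrence loops by the closed form i*geom+1 where geom=(K^n-1)/(K-1) is computed once via fast exponentiation, and successive values are produced by repeated addition.
import Mathlib
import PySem

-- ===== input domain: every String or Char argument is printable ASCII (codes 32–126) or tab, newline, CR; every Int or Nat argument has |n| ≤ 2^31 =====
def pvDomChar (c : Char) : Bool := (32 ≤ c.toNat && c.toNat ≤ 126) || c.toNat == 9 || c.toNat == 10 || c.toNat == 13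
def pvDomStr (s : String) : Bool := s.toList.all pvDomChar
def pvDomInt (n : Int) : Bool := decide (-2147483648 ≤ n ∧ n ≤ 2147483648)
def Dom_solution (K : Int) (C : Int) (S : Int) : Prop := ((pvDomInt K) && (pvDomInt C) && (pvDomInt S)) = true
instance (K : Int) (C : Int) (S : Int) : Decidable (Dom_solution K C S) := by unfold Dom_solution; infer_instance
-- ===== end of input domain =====

-- B replaces A's O(K*C) recurrence loops by the closed form i*geom+1 with geom computed once (objective: faster).

-- ===== PORT A =====
def solution (K : Int) (C : Int) (S : Int) : String :=
  let s := (PySem.List.pyRange 0 K 1).foldl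
    (fun (acc : List Int) i =>
      acc ++ [(PySem.List.pyRange 0 (C - 1) 1).foldl (fun res _ => (res - 1) * K + i + 1) (i + 1)])
    []
  PySem.Str.join " " (s.map PySem.Int.toStr)

-- ===== PORT B =====
def solution_alt (K : Int) (C : Int) (S : Int) : String :=
  if K ≤ 0 then "" else
  let n : Int := max C 1
  let geom : Int := if K = 1 then n else PySem.Int.floordiv (K ^ n.toNat - 1) (K - 1)
  let out := (PySem.List.pyRange 0 K 1).foldl
    (fun (st : List String × Int) _ => (st.1 ++ [PySem.Int.toStr st.2], st.2 + geom))
    ([], 1)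
  PySem.Str.join " " out.1

-- ===== PRECONDITION & SPEC =====
def Spec_solution (K : Int) (C : Int) (S : Int) (out : String) : Prop := out = solution_alt K C S
instance (K : Int) (C : Int) (S : Int) (out : String) : Decidable (Spec_solution K C S out) := by unfold Spec_solution; infer_instance

-- ===== CLAIM (what is proved, stated in full; the proofs are below) =====
def Claim_equal_solution : Prop := ∀ (K : Int) (C : Int) (S : Int), Dom_solution K C S → Spec_solution K C S (solution K C S)

-- ===== LEMMAS AND PROOFS =====

-- geometric sum ∑_{j<m} K^j
def geomSum (K : Int) (m : Nat) : Int := ∑ j ∈ Finset.range m, K ^ j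

theorem geomSum_succ (K : Int) (m : Nat) : geomSum K (m + 1) = geomSum K m * K + 1 := by
  simp only [geomSum, geom_sum_succ]
  ring

-- A's inner loop computes i * geomSum + 1
theorem innerA (K i : Int) (l : List Int) :
    l.foldl (fun res _ => (res - 1) * K + i + 1) (i + 1) = i * geomSum K (l.length + 1) + 1 := by
  have main : ∀ (l : List Int) (t : Nat),
      l.foldl (fun res _ => (res - 1) * K + i + 1) (i * geomSum K t + 1)
        = i * geomSum K (t + l.length) + 1 := by
    intro l
    induction l with
    | nil => intro t; simp
    | cons x xs ih =>
      intro t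
      have h1 : (i * geomSum K t + 1 - 1) * K + i + 1 = i * geomSum K (t + 1) + 1 := by
        rw [geomSum_succ]; ring
      simp only [List.foldl_cons, h1, ih (t + 1), List.length_cons]
      ring_nf
  have h0 : i + 1 = i * geomSum K 1 + 1 := by simp [geomSum]
  rw [h0, main l 1]
  ring_nf

-- A's outer loop is a map
theorem outerA {α β : Type} (f : α → β) (l : List α) (acc : List β) :
    l.foldl (fun acc i => acc ++ [f i]) acc = acc ++ l.map f := by
  induction l generalizing acc with
  | nil => simp
  | cons x xs ih => simp [ih]

-- B's loop invariant
theorem loopB (geom : Int) (l : List Int) (parts : List String) (r : Int) :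
    (l.foldl (fun (st : List String × Int) _ => (st.1 ++ [PySem.Int.toStr st.2], st.2 + geom)) (parts, r))
      = (parts ++ (List.range l.length).map (fun (j : Nat) => PySem.Int.toStr (r + (j : Int) * geom)),
         r + (l.length : Int) * geom) := by
  induction l generalizing parts r with
  | nil => simp
  | cons x xs ih =>
    simp only [List.foldl_cons, ih, List.length_cons, List.range_succ_eq_map, List.map_cons,
      List.map_map, Prod.mk.injEq]
    refine ⟨?_, by push_cast; ring⟩
    simp only [List.append_assoc, List.singleton_append, Nat.cast_zero, zero_mul, add_zero]
    congr 1
    congr 1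
    apply List.map_congr_left
    intro a _
    simp only [Function.comp_apply]
    congr 1
    push_cast
    ring

-- the closed form equals the geometric sum
theorem geom_eq (K : Int) (n : Int) (hn : 1 ≤ n) :
    (if K = 1 then n else PySem.Int.floordiv (K ^ n.toNat - 1) (K - 1)) = geomSum K n.toNat := by
  by_cases hK : K = 1
  · simp [hK, geomSum]
    omega
  · simp only [hK, if_false]
    have hgm : geomSum K n.toNat * (K - 1) = K ^ n.toNat - 1 := geom_sum_mul K n.toNat
    have hne : K - 1 ≠ 0 := fun h => hK (by omega)
    rw [← hgm, PySem.Int.floordiv, Int.mul_fdiv_cancel _ hne]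

-- ===== VERDICT (by name: the statement is the Claim_ definition above) =====
theorem solution_spec : Claim_equal_solution := by
  intro K C S _
  unfold Spec_solution solution solution_alt
  by_cases hK0 : K ≤ 0
  · simp [hK0, PySem.List.pyRange_one_eq_nil hK0, PySem.Str.join]
  simp only [hK0, if_false]
  rw [outerA, loopB]
  dsimp only
  rw [List.nil_append, List.nil_append]
  congr 1
  rw [List.map_map, PySem.List.length_pyRange_one,
    show PySem.List.pyRange 0 K 1 = (List.range (K - 0).toNat).map (fun (k : Nat) => 0 + (k : Int)) from
      PySem.List.pyRange_one 0 K,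
    List.map_map]
  apply List.map_congr_left
  intro k hk
  simp only [Function.comp_apply]
  rw [innerA, PySem.List.length_pyRange_one]
  have hn : (1:Int) ≤ max C 1 := le_max_right _ _
  rw [geom_eq K (max C 1) hn]
  have hm : (C - 1 - 0).toNat + 1 = (max C 1).toNat := by omega
  rw [hm]
  congr 1
  ring
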